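-- pv_equiv track=rewrite | github.com/IRCL-io/Robot-Combat-Trading-Cards | tte_generate_cards.py | update_record_lines
-- ===== SOURCE A (Python) =====
-- def update_record_lines(lines: list[str], record_id: str, field: str, value: str) -> list[str]:
--     updated = []
--     in_record = False
--     found = False
--     for idx, line in enumerate(lines):
--         stripped = line.lstrip()
--         if stripped.startswith("@LAT"):
--             if in_record:
--                 in_record = False
--             in_record = stripped.startswith(record_id)
--         if in_record and stripped.startswith(f"- {field}:"):
--             updated.append(f"- {field}: {value}")
--             found = True
--             continue
--         updated.append(line)
--     if not found:
--         # Insert after Image field if present, otherwise after the title line.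
--         new_lines = []
--         in_record = False
--         inserted = False
--         for line in updated:
--             stripped = line.lstrip()
--             if stripped.startswith("@LAT"):
--                 if in_record:
--                     in_record = False
--                 in_record = stripped.startswith(record_id)
--             new_lines.append(line)
--             if in_record and not inserted:
--                 if stripped.startswith("- Image:"):
--                     new_lines.append(f"- {field}: {value}")
--                     inserted = True
--                 elif stripped.startswith("## "):
--                     # Insert after the title line if Image is not present in this record.
--                     new_lines.append(f"- {field}: {value}")
--                     inserted = True
--         updated = new_lines
--     return updated
-- ===== SOURCE B (Python) =====
-- def update_record_lines(lines: list[str], record_id: str, field: str, value: str) -> list[str]: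
--     marker = f"- {field}: {value}"
--     pfx = f"- {field}:"
--
--     # Partition into a leading chunk and record chunks, each starting at an "@LAT" header.
--     lead: list[str] = []
--     chunks: list[list[str]] = []
--     cur = lead
--     for line in lines:
--         if line.lstrip().startswith("@LAT"):
--             cur = [line]
--             chunks.append(cur)
--         else:
--             cur.append(line)
--
--     def matches(ch: list[str]) -> bool:
--         return ch[0].lstrip().startswith(record_id)
--
--     if any(matches(ch) and any(l.lstrip().startswith(pfx) for l in ch) for ch in chunks):
--         # Field present somewhere in a matching record: rewrite it in every matching record.
--         body = [[marker if l.lstrip().startswith(pfx) else l for l in ch] if matches(ch) else ch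
--                 for ch in chunks]
--     else:
--         # Absent: insert once, after the first "- Image:" or "## " line of a matching record.
--         body = []
--         pending = True
--         for ch in chunks:
--             if pending and matches(ch):
--                 for j, l in enumerate(ch):
--                     s = l.lstrip()
--                     if s.startswith("- Image:") or s.startswith("## "):
--                         ch = ch[:j + 1] + [marker] + ch[j + 1:]
--                         pending = False
--                         break
--             body.append(ch)
--
--     return lead + [l for ch in body for l in ch]
-- ===== Notes on version B (the rewrite author's own statement) =====
-- stated objective: simpler
-- what changed: B partitions the lines once into record chunks (leading chunk + one chunk per '@LAT' header) and then either rewrites the field line in every matching chunk or splices the new field line once into the first matching chunk with an eligible line, instead of A's two stateful line-by-line passes with in_record/found/inserted flags.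
import Mathlib
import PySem

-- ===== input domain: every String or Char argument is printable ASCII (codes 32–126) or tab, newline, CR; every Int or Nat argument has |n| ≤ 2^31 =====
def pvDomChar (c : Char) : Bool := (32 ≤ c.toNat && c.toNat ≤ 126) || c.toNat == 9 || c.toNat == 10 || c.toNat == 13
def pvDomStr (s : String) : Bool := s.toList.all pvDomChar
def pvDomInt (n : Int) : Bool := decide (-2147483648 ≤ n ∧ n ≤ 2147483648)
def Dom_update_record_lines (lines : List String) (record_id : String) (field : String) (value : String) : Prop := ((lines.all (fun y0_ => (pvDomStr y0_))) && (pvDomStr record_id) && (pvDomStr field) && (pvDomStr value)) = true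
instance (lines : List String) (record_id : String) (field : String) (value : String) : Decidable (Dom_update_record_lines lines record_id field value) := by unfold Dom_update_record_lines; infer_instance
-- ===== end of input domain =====

-- B re-implements A by partitioning the lines into record chunks once and then either
-- rewriting matching chunks or splicing the new field into the first eligible chunk
-- (objective: simpler decomposition; same asymptotic cost).

-- ===== PORT A =====
-- first pass: replace the field line in every matching record (state: updated, in_record, found)
def pvA1step (record_id pfx marker : String) (st : List String × Bool × Bool) (p : Int × String) : List String × Bool × Bool :=
  let stripped := PySem.Str.lstrip p.2
  -- `if stripped.startswith("@LAT"): if in_record: in_record = False; in_record = stripped.startswith(record_id)`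
  -- (the inner reset is immediately overwritten, as in the Python)
  let inr := if PySem.Str.startswith stripped "@LAT" then PySem.Str.startswith stripped record_id else st.2.1
  if inr && PySem.Str.startswith stripped pfx then (st.1 ++ [marker], inr, true)
  else (st.1 ++ [p.2], inr, st.2.2)

-- second pass: insert after "- Image:" / "## " in a matching record (state: new_lines, in_record, inserted)
def pvA2step (record_id marker : String) (st : List String × Bool × Bool) (line : String) : List String × Bool × Bool :=
  let stripped := PySem.Str.lstrip line
  let inr := if PySem.Str.startswith stripped "@LAT" then PySem.Str.startswith stripped record_id else st.2.1
  let nl := st.1 ++ [line]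
  if inr && !st.2.2 then
    if PySem.Str.startswith stripped "- Image:" then (nl ++ [marker], inr, true)
    else if PySem.Str.startswith stripped "## " then (nl ++ [marker], inr, true)
    else (nl, inr, st.2.2)
  else (nl, inr, st.2.2)

def update_record_lines (lines : List String) (record_id : String) (field : String) (value : String) : List String :=
  let pfx := "- " ++ field ++ ":"
  let marker := "- " ++ field ++ ": " ++ value
  let r := (PySem.List.enumerate lines 0).foldl (pvA1step record_id pfx marker) ([], false, false)
  if r.2.2 then r.1
  else ((r.1).foldl (pvA2step record_id marker) ([], false, false)).1

-- ===== PORT B =====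
-- partition into (leading chunk, record chunks); state keeps the record chunks in reverse
def pvSplitStep (st : List String × List (List String)) (line : String) : List String × List (List String) :=
  if PySem.Str.startswith (PySem.Str.lstrip line) "@LAT" then (st.1, [line] :: st.2)
  else
    match st.2 with
    | [] => (st.1 ++ [line], [])
    | c :: rest => (st.1, (c ++ [line]) :: rest)

def pvSplitF (lines : List String) : List String × List (List String) :=
  let st := lines.foldl pvSplitStep ([], [])
  (st.1, st.2.reverse)

-- a chunk's header matches the record id (chunks produced by pvSplitF are never empty)
def pvMatches (record_id : String) (ch : List String) : Bool :=
  match ch with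
  | [] => false
  | l :: _ => PySem.Str.startswith (PySem.Str.lstrip l) record_id

-- insert marker after the first "- Image:" / "## " line, none if there is no such line
def pvInsL (marker : String) : List String → Option (List String)
  | [] => none
  | l :: ls =>
    if PySem.Str.startswith (PySem.Str.lstrip l) "- Image:" || PySem.Str.startswith (PySem.Str.lstrip l) "## " then
      some (l :: marker :: ls)
    else (pvInsL marker ls).map (l :: ·)

-- insert once, into the first matching chunk that has an eligible line
def pvInsert (record_id marker : String) : List (List String) → List (List String)
  | [] => []
  | ch :: rest =>
    if pvMatches record_id ch then
      match pvInsL marker ch with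
      | some ch' => ch' :: rest
      | none => ch :: pvInsert record_id marker rest
    else ch :: pvInsert record_id marker rest

def update_record_lines_alt (lines : List String) (record_id : String) (field : String) (value : String) : List String :=
  let marker := "- " ++ field ++ ": " ++ value
  let pfx := "- " ++ field ++ ":"
  let p := pvSplitF lines
  let found := p.2.any (fun ch => pvMatches record_id ch && ch.any (fun l => PySem.Str.startswith (PySem.Str.lstrip l) pfx))
  let body :=
    if found then
      p.2.map (fun ch =>
        if pvMatches record_id ch then
          ch.map (fun l => if PySem.Str.startswith (PySem.Str.lstrip l) pfx then marker else l)
        else ch)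
    else pvInsert record_id marker p.2
  p.1 ++ body.flatten

-- ===== PRECONDITION & SPEC =====
def Spec_update_record_lines (lines : List String) (record_id : String) (field : String) (value : String) (out : List String) : Prop := out = update_record_lines_alt lines record_id field value
instance (lines : List String) (record_id : String) (field : String) (value : String) (out : List String) : Decidable (Spec_update_record_lines lines record_id field value out) := by unfold Spec_update_record_lines; infer_instance

-- ===== CLAIM (what is proved, stated in full; the proofs are below) =====
def Claim_equal_update_record_lines : Prop := ∀ (lines : List String) (record_id : String) (field : String) (value : String), Dom_update_record_lines lines record_id field value → Spec_update_record_lines lines record_id field value (update_record_lines lines record_id field value)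

-- ===== LEMMAS AND PROOFS =====

-- recursive characterisations of A's two passes
def pvGo1 (record_id pfx marker : String) : List String → Bool → List String
  | [], _ => []
  | l :: ls, inr =>
    let s := PySem.Str.lstrip l
    let inr' := if PySem.Str.startswith s "@LAT" then PySem.Str.startswith s record_id else inr
    (if inr' && PySem.Str.startswith s pfx then marker else l) :: pvGo1 record_id pfx marker ls inr'

def pvFnd1 (record_id pfx : String) : List String → Bool → Bool
  | [], _ => false
  | l :: ls, inr =>
    let s := PySem.Str.lstrip l
    let inr' := if PySem.Str.startswith s "@LAT" then PySem.Str.startswith s record_id else inr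
    (inr' && PySem.Str.startswith s pfx) || pvFnd1 record_id pfx ls inr'

def pvQual (l : String) : Bool :=
  PySem.Str.startswith (PySem.Str.lstrip l) "- Image:" || PySem.Str.startswith (PySem.Str.lstrip l) "## "

def pvGo2 (record_id marker : String) : List String → Bool → Bool → List String
  | [], _, _ => []
  | l :: ls, inr, ins =>
    let s := PySem.Str.lstrip l
    let inr' := if PySem.Str.startswith s "@LAT" then PySem.Str.startswith s record_id else inr
    if inr' && !ins then
      if pvQual l then l :: marker :: pvGo2 record_id marker ls inr' true
      else l :: pvGo2 record_id marker ls inr' ins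
    else l :: pvGo2 record_id marker ls inr' ins

-- right-recursive splitter, equal to pvSplitF
def pvSplit : List String → List String × List (List String)
  | [] => ([], [])
  | l :: ls =>
    let p := pvSplit ls
    if PySem.Str.startswith (PySem.Str.lstrip l) "@LAT" then ([], (l :: p.1) :: p.2)
    else (l :: p.1, p.2)

theorem pvSplit_foldl (ls : List String) (lead : List String) (c : List String) (rest : List (List String)) :
    ls.foldl pvSplitStep (lead, c :: rest) =
      (lead, (pvSplit ls).2.reverse ++ ((c ++ (pvSplit ls).1) :: rest)) := by
  induction ls generalizing c rest with
  | nil => simp [pvSplit]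
  | cons l ls ih =>
    rw [List.foldl_cons]
    by_cases h : PySem.Str.startswith (PySem.Str.lstrip l) "@LAT"
    · simp at h; simp [pvSplitStep, pvSplit, h, ih]
    · simp at h; simp [pvSplitStep, pvSplit, h, ih]

theorem pvSplit_foldl_nil (ls : List String) (lead : List String) :
    ls.foldl pvSplitStep (lead, []) = (lead ++ (pvSplit ls).1, (pvSplit ls).2.reverse) := by
  induction ls generalizing lead with
  | nil => simp [pvSplit]
  | cons l ls ih =>
    rw [List.foldl_cons]
    by_cases h : PySem.Str.startswith (PySem.Str.lstrip l) "@LAT"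
    · simp at h; simp [pvSplitStep, pvSplit, h, pvSplit_foldl]
    · simp at h; simp [pvSplitStep, pvSplit, h, ih]

theorem pvSplitF_eq (ls : List String) : pvSplitF ls = pvSplit ls := by
  simp [pvSplitF, pvSplit_foldl_nil]

theorem pvSplit_flatten (ls : List String) : (pvSplit ls).1 ++ (pvSplit ls).2.flatten = ls := by
  induction ls with
  | nil => simp [pvSplit]
  | cons l ls ih =>
    by_cases h : PySem.Str.startswith (PySem.Str.lstrip l) "@LAT"
    · simp at h; simp [pvSplit, h, ih]
    · simp at h; simp [pvSplit, h, ih]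

-- bridge: A's first fold is pvGo1 / pvFnd1
theorem pvA1_bridge (record_id pfx marker : String) (ls : List String) :
    ∀ (acc : List String) (inr f : Bool) (i : Int), ∃ b : Bool,
      (PySem.List.enumerate ls i).foldl (pvA1step record_id pfx marker) (acc, inr, f) =
        (acc ++ pvGo1 record_id pfx marker ls inr, b, f || pvFnd1 record_id pfx ls inr) := by
  induction ls with
  | nil => intro acc inr f i; exact ⟨inr, by simp [pvGo1, pvFnd1]⟩
  | cons l ls ih =>
    intro acc inr f i
    rw [PySem.List.enumerate_cons, List.foldl_cons]
    by_cases h : (if PySem.Str.startswith (PySem.Str.lstrip l) "@LAT" then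
        PySem.Str.startswith (PySem.Str.lstrip l) record_id else inr) &&
        PySem.Str.startswith (PySem.Str.lstrip l) pfx
    · obtain ⟨b, hb⟩ := ih (acc ++ [marker]) _ true (i + 1)
      exact ⟨b, by simp only [pvA1step, h, if_pos, pvGo1, pvFnd1]; rw [hb]; simp⟩
    · obtain ⟨b, hb⟩ := ih (acc ++ [l]) _ f (i + 1)
      exact ⟨b, by simp only [pvA1step, h, pvGo1, pvFnd1]; rw [if_neg (by simp [h]), hb]; simp⟩

-- bridge: A's second fold is pvGo2
theorem pvA2_bridge (record_id marker : String) (ls : List String) :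
    ∀ (acc : List String) (inr ins : Bool), ∃ b c : Bool,
      ls.foldl (pvA2step record_id marker) (acc, inr, ins) = (acc ++ pvGo2 record_id marker ls inr ins, b, c) := by
  induction ls with
  | nil => intro acc inr ins; exact ⟨inr, ins, by simp [pvGo2]⟩
  | cons l ls ih =>
    intro acc inr ins
    rw [List.foldl_cons]
    obtain ⟨b, c, hb⟩ := ih (pvA2step record_id marker (acc, inr, ins) l).1
      (pvA2step record_id marker (acc, inr, ins) l).2.1 (pvA2step record_id marker (acc, inr, ins) l).2.2
    refine ⟨b, c, ?_⟩
    rw [show ((pvA2step record_id marker (acc, inr, ins) l).1,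
        (pvA2step record_id marker (acc, inr, ins) l).2.1,
        (pvA2step record_id marker (acc, inr, ins) l).2.2) = pvA2step record_id marker (acc, inr, ins) l from rfl] at hb
    rw [hb]
    by_cases hA : PySem.Chars.startswith (PySem.Chars.lstrip l.toList) ['@','L','A','T'] = true <;>
      by_cases hR : PySem.Chars.startswith (PySem.Chars.lstrip l.toList) record_id.toList = true <;>
      by_cases h1 : PySem.Chars.startswith (PySem.Chars.lstrip l.toList) ['-',' ','I','m','a','g','e',':'] = true <;>
      by_cases h2 : PySem.Chars.startswith (PySem.Chars.lstrip l.toList) ['#','#',' '] = true <;>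
      cases ins <;> cases inr <;>
      simp [pvA2step, pvGo2, pvQual, hA, hR, h1, h2]

theorem pvGo1_chunks (record_id pfx marker : String) (ls : List String) (inr : Bool) :
    pvGo1 record_id pfx marker ls inr =
      (if inr then (pvSplit ls).1.map (fun l => if PySem.Str.startswith (PySem.Str.lstrip l) pfx then marker else l) else (pvSplit ls).1) ++
      ((pvSplit ls).2.map (fun ch =>
        if pvMatches record_id ch then
          ch.map (fun l => if PySem.Str.startswith (PySem.Str.lstrip l) pfx then marker else l)
        else ch)).flatten := by
  induction ls generalizing inr with
  | nil => simp [pvGo1, pvSplit]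
  | cons l ls ih =>
    by_cases h : PySem.Str.startswith (PySem.Str.lstrip l) "@LAT"
    · by_cases m : PySem.Str.startswith (PySem.Str.lstrip l) record_id
      · simp at h m; simp [pvGo1, pvSplit, pvMatches, h, m, ih]
      · simp at h m; simp [pvGo1, pvSplit, pvMatches, h, m, ih]
    · simp at h
      cases inr
      · simp [pvGo1, pvSplit, h, ih]
      · simp [pvGo1, pvSplit, h, ih]

theorem pvFnd1_chunks (record_id pfx : String) (ls : List String) (inr : Bool) :
    pvFnd1 record_id pfx ls inr =
      ((inr && (pvSplit ls).1.any (fun l => PySem.Str.startswith (PySem.Str.lstrip l) pfx)) ||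
       (pvSplit ls).2.any (fun ch => pvMatches record_id ch && ch.any (fun l => PySem.Str.startswith (PySem.Str.lstrip l) pfx))) := by
  induction ls generalizing inr with
  | nil => simp [pvFnd1, pvSplit]
  | cons l ls ih =>
    by_cases h : PySem.Str.startswith (PySem.Str.lstrip l) "@LAT"
    · simp at h; simp [pvFnd1, pvSplit, pvMatches, h, ih, Bool.and_or_distrib_left, Bool.or_assoc]
    · simp at h; simp [pvFnd1, pvSplit, h, ih, Bool.and_or_distrib_left, Bool.or_assoc]

theorem pvGo1_id (record_id pfx marker : String) (ls : List String) (inr : Bool)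
    (h : pvFnd1 record_id pfx ls inr = false) : pvGo1 record_id pfx marker ls inr = ls := by
  induction ls generalizing inr with
  | nil => simp [pvGo1]
  | cons l ls ih =>
    simp only [pvFnd1, Bool.or_eq_false_iff] at h
    simp only [pvGo1, h.1, Bool.false_eq_true, if_false]
    rw [ih _ h.2]

theorem pvGo2_true (record_id marker : String) (ls : List String) (inr : Bool) :
    pvGo2 record_id marker ls inr true = ls := by
  induction ls generalizing inr with
  | nil => rfl
  | cons l ls ih => simp [pvGo2, ih]

theorem pvGo2_chunks (record_id marker : String) (ls : List String) (inr : Bool) :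
    pvGo2 record_id marker ls inr false =
      (match (if inr then pvInsL marker (pvSplit ls).1 else none) with
       | some lead' => lead' ++ (pvSplit ls).2.flatten
       | none => (pvSplit ls).1 ++ (pvInsert record_id marker (pvSplit ls).2).flatten) := by
  induction ls generalizing inr with
  | nil => cases inr <;> simp [pvGo2, pvSplit, pvInsL, pvInsert]
  | cons l ls ih =>
    by_cases hA : PySem.Chars.startswith (PySem.Chars.lstrip l.toList) ['@','L','A','T'] = true <;>
      by_cases hR : PySem.Chars.startswith (PySem.Chars.lstrip l.toList) record_id.toList = true <;>
      by_cases h1 : PySem.Chars.startswith (PySem.Chars.lstrip l.toList) ['-',' ','I','m','a','g','e',':'] = true <;>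
      by_cases h2 : PySem.Chars.startswith (PySem.Chars.lstrip l.toList) ['#','#',' '] = true <;>
      cases inr <;> cases hw : pvInsL marker (pvSplit ls).1 <;>
      simp [pvGo2, pvSplit, pvInsert, pvMatches, pvInsL, pvQual, hA, hR, h1, h2, hw, ih,
        pvGo2_true, pvSplit_flatten]

-- ===== VERDICT (by name: the statement is the Claim_ definition above) =====
theorem update_record_lines_spec : Claim_equal_update_record_lines := by
  intro lines record_id field value _
  unfold Spec_update_record_lines update_record_lines update_record_lines_alt
  rw [pvSplitF_eq]
  dsimp only
  obtain ⟨b, hb⟩ := pvA1_bridge record_id ("- " ++ field ++ ":") ("- " ++ field ++ ": " ++ value) lines [] false false 0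
  rw [hb]
  simp only [List.nil_append, Bool.false_or]
  have hf2 := pvFnd1_chunks record_id ("- " ++ field ++ ":") lines false
  simp only [Bool.false_and, Bool.false_or] at hf2
  by_cases hf : pvFnd1 record_id ("- " ++ field ++ ":") lines false = false
  · rw [hf] at hf2 ⊢
    simp only [← hf2, Bool.false_eq_true, if_false]
    obtain ⟨b2, c2, hb2⟩ := pvA2_bridge record_id ("- " ++ field ++ ": " ++ value) lines [] false false
    rw [pvGo1_id _ _ _ _ _ hf, hb2, List.nil_append, pvGo2_chunks]
    simp
  · rw [Bool.not_eq_false] at hf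
    rw [hf] at hf2 ⊢
    simp only [← hf2, pvGo1_chunks, Bool.false_eq_true, if_false]
    simp
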